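-- pv_equiv track=rewrite | github.com/pypi-data/pypi-mirror-402 | packages/himena/himena-0.1.7-py3-none-any.whl/himena_builtins/qt/widgets/_text_base.py | _get_indents
-- ===== SOURCE A (Python) =====
-- def _get_indents(text: str, tab_spaces: int = 4) -> str:
--     chars = []
--     for c in text:
--         if c == " ":
--             chars.append(" ")
--         elif c == "\t":
--             chars.append(" " * tab_spaces)
--         else:
--             break
--     return "".join(chars)
-- ===== SOURCE B (Python) =====
-- def _get_indents(text: str, tab_spaces: int = 4) -> str:
--     stripped = text.lstrip(" \t")
--     n = len(text) - len(stripped)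
--     tabs = text[:n].count("\t")
--     return " " * (n - tabs) + " " * (tabs * tab_spaces)
-- ===== Notes on version B (the rewrite author's own statement) =====
-- stated objective: alternative
-- what changed: B finds the whitespace boundary with lstrip, counts the tabs in that prefix, and builds the result as one arithmetic space-string concatenation instead of A's per-character accumulate-and-join loop.
import Mathlib
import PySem

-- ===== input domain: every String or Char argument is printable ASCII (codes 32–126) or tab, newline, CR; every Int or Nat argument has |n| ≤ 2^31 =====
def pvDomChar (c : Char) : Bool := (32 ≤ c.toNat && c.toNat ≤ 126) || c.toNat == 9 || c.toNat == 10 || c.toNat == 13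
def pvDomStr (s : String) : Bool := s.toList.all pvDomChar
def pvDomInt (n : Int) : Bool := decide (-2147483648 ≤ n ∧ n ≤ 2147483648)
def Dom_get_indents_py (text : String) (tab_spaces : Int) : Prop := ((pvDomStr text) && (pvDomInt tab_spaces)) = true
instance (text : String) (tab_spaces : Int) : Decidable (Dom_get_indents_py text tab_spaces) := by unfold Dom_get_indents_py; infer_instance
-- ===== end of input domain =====

-- B replaces A's per-character accumulate-and-join loop by boundary-finding (lstrip), a tab count, and one arithmetic space-string construction; alternative decomposition, same cost.

-- ===== PORT A =====
-- the 'for c in text: … break' loop accumulating `chars`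
def getIndentsGo (tab_spaces : Int) : List Char → List String
  | [] => []
  | c :: rest =>
    if c == ' ' then " " :: getIndentsGo tab_spaces rest
    else if c == '\t' then String.ofList (List.replicate tab_spaces.toNat ' ') :: getIndentsGo tab_spaces rest
    else []

def get_indents_py (text : String) (tab_spaces : Int) : String :=
  PySem.Str.join "" (getIndentsGo tab_spaces text.toList)   -- "".join(chars)

-- ===== PORT B =====
def get_indents_py_alt (text : String) (tab_spaces : Int) : String :=
  let cs := text.toList
  -- text.lstrip(" \t"): ported by hand (PySem.Chars.lstrip strips all whitespace, not a char set); exact: drop leading ' '/'\t'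
  let stripped := cs.dropWhile (fun c => c == ' ' || c == '\t')
  let n : Int := (cs.length : Int) - (stripped.length : Int)   -- len(text) - len(stripped)
  let prefix_ := PySem.List.slice cs none (some n)             -- text[:n]
  let tabs : Int := (PySem.Chars.count prefix_ ['\t'] : Int)   -- text[:n].count("\t")
  -- " " * (n - tabs) + " " * (tabs * tab_spaces)
  String.ofList (List.replicate (n - tabs).toNat ' ' ++ List.replicate (tabs * tab_spaces).toNat ' ')

-- ===== PRECONDITION & SPEC =====
def Spec_get_indents_py (text : String) (tab_spaces : Int) (out : String) : Prop := out = get_indents_py_alt text tab_spaces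
instance (text : String) (tab_spaces : Int) (out : String) : Decidable (Spec_get_indents_py text tab_spaces out) := by unfold Spec_get_indents_py; infer_instance

-- ===== CLAIM (what is proved, stated in full; the proofs are below) =====
def Claim_equal_get_indents_py : Prop := ∀ (text : String) (tab_spaces : Int), Dom_get_indents_py text tab_spaces → Spec_get_indents_py text tab_spaces (get_indents_py text tab_spaces)

-- ===== LEMMAS AND PROOFS =====

theorem repl_cons (n m : Nat) (h : m = n + 1) : ' ' :: List.replicate n ' ' = List.replicate m ' ' := by
  subst h; rw [List.replicate_succ]

theorem repl_app (a b m : Nat) (h : m = a + b) :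
    List.replicate a ' ' ++ List.replicate b ' ' = List.replicate m ' ' := by
  subst h; rw [List.replicate_add]

theorem join_empty_sep (parts : List (List Char)) : PySem.Chars.join [] parts = parts.flatten := by
  induction parts with
  | nil => simp [PySem.Chars.join_nil]
  | cons p rest ih =>
    cases rest with
    | nil => simp [PySem.Chars.join_singleton]
    | cons q r => simp [PySem.Chars.join_cons_cons, ih]

theorem count_go_single (c : Char) (s : List Char) (fuel acc : Nat) (h : s.length ≤ fuel) :
    PySem.Chars.count.go [c] fuel s acc = acc + s.countP (· == c) := by
  induction s generalizing fuel acc with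
  | nil => cases fuel <;> simp [PySem.Chars.count.go]
  | cons a t ih =>
    cases fuel with
    | zero => simp at h
    | succ f =>
      simp only [List.length_cons] at h
      rw [show PySem.Chars.count.go [c] (f+1) (a :: t) acc
          = if [c].isPrefixOf (a :: t) then PySem.Chars.count.go [c] f (List.drop 1 (a :: t)) (acc+1)
            else PySem.Chars.count.go [c] f t acc from rfl]
      by_cases hc : c = a
      · rw [if_pos (by simp [List.isPrefixOf, hc])]
        have hd : List.drop 1 (a :: t) = t := rfl
        rw [hd, ih f (acc + 1) (by omega), List.countP_cons, if_pos (by simp [hc])]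
        omega
      · rw [if_neg (by simp [List.isPrefixOf]; exact hc)]
        rw [ih f acc (by omega), List.countP_cons,
          if_neg (by simp; exact fun h' => hc h'.symm)]
        omega

theorem count_single (c : Char) (s : List Char) :
    PySem.Chars.count s [c] = s.countP (· == c) := by
  simp only [PySem.Chars.count, List.isEmpty_cons, if_false, Bool.false_eq_true]
  simpa using count_go_single c s s.length 0 le_rfl

-- length of an all-' '/'\t' list splits into the two counts
theorem len_split (l : List Char) (h : ∀ c ∈ l, (c == ' ' || c == '\t') = true) :
    l.length = l.countP (· == ' ') + l.countP (· == '\t') := by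
  induction l with
  | nil => simp
  | cons c rest ih =>
    have hc := h c (by simp)
    have hrest := ih (fun d hd => h d (by simp [hd]))
    by_cases hs : c = ' '
    · simp [hs, hrest]
      omega
    · have ht : c = '\t' := by
        rcases Bool.or_eq_true_iff.mp hc with h' | h'
        · exact absurd (by simpa using h') hs
        · simpa using h'
      simp [ht, hrest]
      omega

-- A's loop output, flattened, is a run of spaces of the counted length
theorem goA_flatten (t : Int) (cs : List Char) :
    (List.map String.toList (getIndentsGo t cs)).flatten
      = List.replicate
          ((cs.takeWhile (fun c => c == ' ' || c == '\t')).countP (· == ' ')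
            + (cs.takeWhile (fun c => c == ' ' || c == '\t')).countP (· == '\t') * t.toNat) ' ' := by
  induction cs with
  | nil => simp [getIndentsGo]
  | cons c rest ih =>
    by_cases hs : c = ' '
    · subst hs
      have e1 : List.takeWhile (fun c => c == ' ' || c == '\t') (' ' :: rest)
          = ' ' :: List.takeWhile (fun c => c == ' ' || c == '\t') rest := by
        simp
      have e2 : getIndentsGo t (' ' :: rest) = " " :: getIndentsGo t rest := by
        simp [getIndentsGo]
      rw [e2, List.map_cons, List.flatten_cons, ih, e1, List.countP_cons, List.countP_cons,
        show (" " : String).toList = [' '] from by decide, List.singleton_append]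
      simp only [show ((' ' : Char) == ' ') = true from by decide,
        show ((' ' : Char) == '\t') = false from by decide, if_true, if_false,
        Bool.false_eq_true, Nat.add_zero]
      exact repl_cons _ _ (by ring)
    · by_cases ht : c = '\t'
      · subst ht
        have e1 : List.takeWhile (fun c => c == ' ' || c == '\t') ('\t' :: rest)
            = '\t' :: List.takeWhile (fun c => c == ' ' || c == '\t') rest := by
          simp
        have e2 : getIndentsGo t ('\t' :: rest)
            = String.ofList (List.replicate t.toNat ' ') :: getIndentsGo t rest := by
          simp [getIndentsGo]
        rw [e2, List.map_cons, List.flatten_cons, ih, e1, List.countP_cons, List.countP_cons,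
          String.toList_ofList]
        simp only [show (('\t' : Char) == ' ') = false from by decide,
          show (('\t' : Char) == '\t') = true from by decide, if_true, if_false,
          Bool.false_eq_true, Nat.add_zero]
        exact repl_app _ _ _ (by ring)
      · have hp : ((c == ' ' || c == '\t') : Bool) = false := by
          simp [hs, ht]
        simp [getIndentsGo, hs, ht, hp]

-- B's result as a run of spaces of the same counted length
theorem alt_eq (text : String) (t : Int) :
    get_indents_py_alt text t
      = String.ofList (List.replicate
          ((text.toList.takeWhile (fun c => c == ' ' || c == '\t')).countP (· == ' ')
            + (text.toList.takeWhile (fun c => c == ' ' || c == '\t')).countP (· == '\t') * t.toNat) ' ') := by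
  simp only [get_indents_py_alt]
  have hlen : (text.toList.takeWhile (fun c => c == ' ' || c == '\t')).length
      + (text.toList.dropWhile (fun c => c == ' ' || c == '\t')).length = text.toList.length := by
    rw [← List.length_append, List.takeWhile_append_dropWhile]
  have hpre : PySem.List.slice text.toList none
      (some ((text.toList.length : Int) - ((text.toList.dropWhile (fun c => c == ' ' || c == '\t')).length : Int)))
      = text.toList.takeWhile (fun c => c == ' ' || c == '\t') := by
    rw [show ((text.toList.length : Int) - ((text.toList.dropWhile (fun c => c == ' ' || c == '\t')).length : Int))
        = (((text.toList.takeWhile (fun c => c == ' ' || c == '\t')).length : Nat) : Int) from by omega]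
    rw [PySem.List.slice_to _ (by positivity), Int.toNat_natCast]
    exact (List.prefix_iff_eq_take.mp (List.takeWhile_prefix _)).symm
  rw [hpre, count_single]
  have hmem : ∀ c ∈ text.toList.takeWhile (fun c => c == ' ' || c == '\t'),
      ((c == ' ' || c == '\t') : Bool) = true := by
    intro c hc
    exact List.mem_takeWhile_imp (p := fun c => c == ' ' || c == '\t') hc
  have hsplit := len_split _ hmem
  have hA : (((text.toList.length : Int) - ((text.toList.dropWhile (fun c => c == ' ' || c == '\t')).length : Int))
        - (((text.toList.takeWhile (fun c => c == ' ' || c == '\t')).countP (· == '\t') : Nat) : Int)).toNat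
      = (text.toList.takeWhile (fun c => c == ' ' || c == '\t')).countP (· == ' ') := by omega
  have hB : ((((text.toList.takeWhile (fun c => c == ' ' || c == '\t')).countP (· == '\t') : Nat) : Int) * t).toNat
      = (text.toList.takeWhile (fun c => c == ' ' || c == '\t')).countP (· == '\t') * t.toNat := by
    by_cases hpos : 0 ≤ t
    · rw [← Int.toNat_of_nonneg hpos, ← Nat.cast_mul, Int.toNat_natCast, Int.toNat_natCast]
    · have hneg : t ≤ 0 := by omega
      rw [Int.toNat_of_nonpos (mul_nonpos_of_nonneg_of_nonpos (by positivity) hneg),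
        Int.toNat_of_nonpos hneg, Nat.mul_zero]
  rw [hA, hB]
  exact congrArg String.ofList (repl_app _ _ _ rfl)

-- ===== VERDICT (by name: the statement is the Claim_ definition above) =====
theorem get_indents_py_spec : Claim_equal_get_indents_py := by
  intro text t _
  show get_indents_py text t = get_indents_py_alt text t
  rw [alt_eq]
  unfold get_indents_py
  rw [show PySem.Str.join "" (getIndentsGo t text.toList)
      = String.ofList (PySem.Chars.join ("" : String).toList ((getIndentsGo t text.toList).map String.toList)) from rfl,
    show ("" : String).toList = ([] : List Char) from by decide,
    join_empty_sep, goA_flatten]
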